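-- pv_equiv track=rewrite | github.com/slightlydistracted/Bubbles-payload | common/black_swan_agent/validate_lexicon.py | analyze_drift
-- ===== SOURCE A (Python) =====
-- from collections import defaultdict
--
-- def analyze_drift(lexicon):
--     term_usage = defaultdict(lambda: defaultdict(set))
--
--     for file, contents in lexicon.items():
--         for category, items in contents.items():
--             for item in items:
--                 term_usage[category][item].add(file)
--
--     drift_suspects = {}
--     for category, terms in term_usage.items():
--         normalized = defaultdict(list)
--         for term in terms:
--             base = term.replace("_", "").lower()
--             normalized[base].append(term)
--
--         for base_form, variants in normalized.items():
--             if len(variants) > 1: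
--                 drift_suspects[base_form] = variants
--
--     return drift_suspects
-- ===== SOURCE B (Python) =====
-- def analyze_drift(lexicon):
--     # One fused pass: group variants per category directly, dedup with a per-category seen set;
--     # no intermediate term_usage table of file-sets (A never uses the files).
--     groups = {}   # category -> {base_form: [variants in first-seen order]}
--     seen = {}     # category -> set of exact terms already grouped
--     for file, contents in lexicon.items():
--         for category, items in contents.items():
--             for item in items:
--                 s = seen.get(category, set())
--                 if item in s:
--                     continue
--                 s.add(item)
--                 seen[category] = s
--                 g = groups.get(category, {})
--                 base = item.replace("_", "").lower()
--                 g[base] = g.get(base, []) + [item]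
--                 groups[category] = g
--     drift_suspects = {}
--     for bases in groups.values():
--         for base, variants in bases.items():
--             if len(variants) > 1:
--                 drift_suspects[base] = variants
--     return drift_suspects
-- ===== Notes on version B (the rewrite author's own statement) =====
-- stated objective: simpler
-- what changed: B replaces A's two-phase design (build a category->term->file-set table, then per category rebuild a normalized grouping from its term keys) with one fused pass that groups variants per category directly under base = item.replace('_','').lower(), deduplicating exact terms with a per-category seen set and never materialising the unused file-sets.
import Mathlib
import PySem

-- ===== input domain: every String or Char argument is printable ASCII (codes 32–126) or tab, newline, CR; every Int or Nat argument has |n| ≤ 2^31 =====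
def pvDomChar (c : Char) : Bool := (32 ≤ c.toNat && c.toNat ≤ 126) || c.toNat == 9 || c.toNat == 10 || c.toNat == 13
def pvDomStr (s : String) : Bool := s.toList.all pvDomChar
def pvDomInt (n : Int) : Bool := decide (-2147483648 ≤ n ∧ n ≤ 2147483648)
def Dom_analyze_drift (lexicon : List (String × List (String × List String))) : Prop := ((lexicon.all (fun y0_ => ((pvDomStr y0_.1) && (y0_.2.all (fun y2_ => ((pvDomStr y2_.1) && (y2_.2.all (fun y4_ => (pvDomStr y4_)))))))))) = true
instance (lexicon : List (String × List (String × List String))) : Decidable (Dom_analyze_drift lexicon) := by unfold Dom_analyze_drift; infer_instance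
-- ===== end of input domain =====

-- B fuses A's two phases into one pass that groups spelling variants per category directly,
-- dropping A's intermediate term_usage table of file-sets (which A never reads); objective: simpler.

-- shared helper: base = item.replace("_", "").lower()
def pvBase (t : String) : String := PySem.Str.lower (PySem.Str.replace t "_" "")

-- ===== PORT A =====
def analyze_drift (lexicon : List (String × List (String × List String))) : List (String × List String) :=
  -- term_usage = defaultdict(lambda: defaultdict(set)); triple loop adding file per (category, item)
  let term_usage : PySem.Dict String (PySem.Dict String (PySem.Set String)) :=
    lexicon.foldl (fun tu fc =>
      fc.2.foldl (fun tu ci =>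
        ci.2.foldl (fun tu item =>
          let inner := tu.getD ci.1 PySem.Dict.empty
          tu.insert ci.1 (inner.insert item ((inner.getD item PySem.Set.empty).add fc.1)))
        tu) tu) PySem.Dict.empty
  -- drift_suspects loop: per category rebuild 'normalized' from the term keys, keep bases with > 1 variants
  let drift : PySem.Dict String (List String) :=
    term_usage.items.foldl (fun ds ct =>
      let normalized : PySem.Dict String (List String) :=
        ct.2.keys.foldl (fun nd term => nd.modify (pvBase term) [] (fun l => l ++ [term])) PySem.Dict.empty
      normalized.items.foldl (fun ds bv => if bv.2.length > 1 then ds.insert bv.1 bv.2 else ds) ds)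
    PySem.Dict.empty
  drift.items

-- ===== PORT B =====
def analyze_drift_alt (lexicon : List (String × List (String × List String))) : List (String × List String) :=
  -- one pass: st.1 = groups (category -> base -> variants), st.2 = seen (category -> set of exact terms)
  let st :=
    lexicon.foldl (fun st fc =>
      fc.2.foldl (fun st ci =>
        ci.2.foldl (fun st item =>
          let s := st.2.getD ci.1 PySem.Set.empty
          if s.contains item then st
          else
            let g := st.1.getD ci.1 PySem.Dict.empty
            let base := pvBase item
            (st.1.insert ci.1 (g.insert base (g.getD base [] ++ [item])),
             st.2.insert ci.1 (s.add item)))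
        st) st)
      ((PySem.Dict.empty : PySem.Dict String (PySem.Dict String (List String))),
       (PySem.Dict.empty : PySem.Dict String (PySem.Set String)))
  let drift : PySem.Dict String (List String) :=
    st.1.values.foldl (fun ds bases =>
      bases.items.foldl (fun ds bv => if bv.2.length > 1 then ds.insert bv.1 bv.2 else ds) ds)
    PySem.Dict.empty
  drift.items

-- ===== PRECONDITION & SPEC =====
def Spec_analyze_drift (lexicon : List (String × List (String × List String))) (out : List (String × List String)) : Prop := out = analyze_drift_alt lexicon
instance (lexicon : List (String × List (String × List String))) (out : List (String × List String)) : Decidable (Spec_analyze_drift lexicon out) := by unfold Spec_analyze_drift; infer_instance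

-- ===== CLAIM (what is proved, stated in full; the proofs are below) =====
def Claim_equal_analyze_drift : Prop := ∀ (lexicon : List (String × List (String × List String))), Dom_analyze_drift lexicon → Spec_analyze_drift lexicon (analyze_drift lexicon)

-- ===== LEMMAS AND PROOFS =====

-- named copies (definitionally equal to the port bodies) of the loop step functions
def pvItemA (file c : String) (tu : PySem.Dict String (PySem.Dict String (PySem.Set String)))
    (item : String) : PySem.Dict String (PySem.Dict String (PySem.Set String)) :=
  let inner := tu.getD c PySem.Dict.empty
  tu.insert c (inner.insert item ((inner.getD item PySem.Set.empty).add file))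

def pvSt : Type := PySem.Dict String (PySem.Dict String (List String)) × PySem.Dict String (PySem.Set String)

def pvItemB (c : String) (st : pvSt) (item : String) : pvSt :=
  let s := st.2.getD c PySem.Set.empty
  if s.contains item then st
  else
    let g := st.1.getD c PySem.Dict.empty
    let base := pvBase item
    (st.1.insert c (g.insert base (g.getD base [] ++ [item])), st.2.insert c (s.add item))

def pvCatA (file : String) (tu : PySem.Dict String (PySem.Dict String (PySem.Set String)))
    (ci : String × List String) : PySem.Dict String (PySem.Dict String (PySem.Set String)) :=
  ci.2.foldl (pvItemA file ci.1) tu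

def pvCatB (st : pvSt) (ci : String × List String) : pvSt :=
  ci.2.foldl (pvItemB ci.1) st

def pvFileA (tu : PySem.Dict String (PySem.Dict String (PySem.Set String)))
    (fc : String × List (String × List String)) : PySem.Dict String (PySem.Dict String (PySem.Set String)) :=
  fc.2.foldl (pvCatA fc.1) tu

def pvFileB (st : pvSt) (fc : String × List (String × List String)) : pvSt :=
  fc.2.foldl pvCatB st

-- A's per-category 'normalized' builder, as a function of the term list
def pvNorm (ks : List String) : PySem.Dict String (List String) :=
  ks.foldl (fun nd term => nd.modify (pvBase term) [] (fun l => l ++ [term])) PySem.Dict.empty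

def pvDStep (ds : PySem.Dict String (List String)) (bv : String × List String) :
    PySem.Dict String (List String) :=
  if bv.2.length > 1 then ds.insert bv.1 bv.2 else ds

-- map a function over the values of a dict (keys and order kept)
def pvMapV {ν ν' : Type} (h : ν → ν') (d : PySem.Dict String ν) : PySem.Dict String ν' :=
  PySem.Dict.mk (d.items.map (fun p => (p.1, h p.2)))

-- abstraction: B's fold state as a function of A's term_usage
def pvF (tu : PySem.Dict String (PySem.Dict String (PySem.Set String))) : pvSt :=
  (pvMapV (fun inner => pvNorm inner.keys) tu, pvMapV PySem.Dict.keys tu)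

theorem get?_pvMapV {ν ν' : Type} (h : ν → ν') (d : PySem.Dict String ν) (k : String) :
    (pvMapV h d).get? k = (d.get? k).map h := by
  obtain ⟨l⟩ := d
  induction l with
  | nil => rfl
  | cons a t ih =>
    by_cases hk : (a.1 == k) = true
    · simp [pvMapV, PySem.Dict.get?, List.find?, hk]
    · simpa [pvMapV, PySem.Dict.get?, List.find?, hk] using ih

theorem getD_pvMapV {ν ν' : Type} (h : ν → ν') (d : PySem.Dict String ν) (k : String) (d0 : ν) :
    (pvMapV h d).getD k (h d0) = h (d.getD k d0) := by
  simp only [PySem.Dict.getD_eq_get?_getD, get?_pvMapV]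
  cases d.get? k <;> rfl

theorem contains_pvMapV {ν ν' : Type} (h : ν → ν') (d : PySem.Dict String ν) (k : String) :
    (pvMapV h d).contains k = d.contains k := by
  simp [pvMapV, PySem.Dict.contains, List.any_map, Function.comp_def]

theorem keys_pvMapV {ν ν' : Type} (h : ν → ν') (d : PySem.Dict String ν) :
    (pvMapV h d).keys = d.keys := by
  simp [pvMapV, PySem.Dict.keys, List.map_map, Function.comp_def]

theorem values_pvMapV {ν ν' : Type} (h : ν → ν') (d : PySem.Dict String ν) :
    (pvMapV h d).values = d.items.map (fun p => h p.2) := by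
  simp [pvMapV, PySem.Dict.values, List.map_map, Function.comp_def]

theorem insert_pvMapV {ν ν' : Type} (h : ν → ν') (d : PySem.Dict String ν) (k : String) (v : ν) :
    pvMapV h (d.insert k v) = (pvMapV h d).insert k (h v) := by
  apply PySem.Dict.ext
  show (PySem.Dict.mk ((d.insert k v).items.map (fun p => (p.1, h p.2)))).items
      = ((pvMapV h d).insert k (h v)).items
  simp only [PySem.Dict.insert, contains_pvMapV]
  split_ifs with hc
  · simp only [pvMapV, List.map_map]
    apply List.map_congr_left
    intro p _
    by_cases hpk : p.1 = k <;> simp [hpk]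
  · simp [pvMapV]

-- replacing, in a list with unique first components, the pair found at key k by itself is the identity
theorem map_replace_eq_self {ν : Type} (k : String) (v : ν) :
    ∀ (l : List (String × ν)), (l.map (fun x => x.1)).Nodup →
      ((l.find? (fun p => p.1 == k)).map (fun p => p.2)) = some v →
      l.map (fun p => if (p.1 == k) = true then (k, v) else p) = l := by
  intro l
  induction l with
  | nil => intro _ hv; simp at hv
  | cons a t ih =>
    intro hnd hv
    simp only [List.map_cons, List.nodup_cons] at hnd
    by_cases hk : (a.1 == k) = true
    · have hak : a.1 = k := eq_of_beq hk
      have hva : a.2 = v := by simpa [List.find?, hk] using hv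
      have htail : t.map (fun p => if (p.1 == k) = true then (k, v) else p) = t := by
        conv_rhs => rw [← List.map_id t]
        apply List.map_congr_left
        intro p hp
        have hpk : ¬ (p.1 == k) = true := by
          intro he
          exact hnd.1 (hak ▸ (eq_of_beq he) ▸ List.mem_map_of_mem hp)
        simp [hpk]
      rw [List.map_cons, htail, if_pos hk, ← hak, ← hva]
    · have hfind : (t.find? (fun p => p.1 == k)).map (fun p => p.2) = some v := by
        simpa [List.find?, hk] using hv
      rw [List.map_cons, if_neg hk, ih hnd.2 hfind]

-- inserting back the value already stored at a key (unique keys) changes nothing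
theorem insert_get?_self {ν : Type} (d : PySem.Dict String ν) (k : String) (v : ν)
    (hnd : d.keys.Nodup) (hv : d.get? k = some v) : d.insert k v = d := by
  have hc : d.contains k = true := by
    rw [PySem.Dict.contains_eq_isSome_get?, hv]; rfl
  apply PySem.Dict.ext
  show (d.insert k v).items = d.items
  simp only [PySem.Dict.insert, hc, if_pos]
  exact map_replace_eq_self k v d.items hnd hv

theorem pvNorm_append (ks : List String) (t : String) :
    pvNorm (ks ++ [t])
      = (pvNorm ks).insert (pvBase t) ((pvNorm ks).getD (pvBase t) [] ++ [t]) := by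
  simp [pvNorm, List.foldl_append, PySem.Dict.modify]

-- the single-item step of B simulates the single-item step of A through pvF
theorem item_commute (file c : String)
    (tu : PySem.Dict String (PySem.Dict String (PySem.Set String))) (item : String)
    (hnd : tu.keys.Nodup) :
    pvItemB c (pvF tu) item = pvF (pvItemA file c tu item) := by
  have hs : (pvF tu).2.getD c PySem.Set.empty = (tu.getD c PySem.Dict.empty).keys :=
    getD_pvMapV PySem.Dict.keys tu c PySem.Dict.empty
  have hg : (pvF tu).1.getD c PySem.Dict.empty = pvNorm (tu.getD c PySem.Dict.empty).keys :=
    getD_pvMapV (fun (inner : PySem.Dict String (PySem.Set String)) => pvNorm inner.keys) tu c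
      PySem.Dict.empty
  by_cases hci : (tu.getD c PySem.Dict.empty).contains item = true
  · -- item already seen in this category: both sides leave the state unchanged
    have hkc : PySem.Set.contains ((tu.getD c PySem.Dict.empty).keys) item = true := by
      simp only [PySem.Set.contains]
      exact List.contains_iff_mem.mpr ((PySem.Dict.contains_iff_mem_keys _ item).mp hci)
    have hget : tu.get? c = some (tu.getD c PySem.Dict.empty) := by
      cases h : tu.get? c with
      | none =>
        exfalso
        rw [PySem.Dict.getD_eq_get?_getD, h] at hci
        simp [PySem.Dict.contains, PySem.Dict.empty] at hci
      | some d' => rw [PySem.Dict.getD_eq_get?_getD, h]; rfl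
    have hkeys' :
        ((tu.getD c PySem.Dict.empty).insert item
          (((tu.getD c PySem.Dict.empty).getD item PySem.Set.empty).add file)).keys
        = (tu.getD c PySem.Dict.empty).keys :=
      PySem.Dict.keys_insert_of_contains _ _ hci
    have h1 : pvMapV (fun inner => pvNorm inner.keys) (pvItemA file c tu item)
        = pvMapV (fun inner => pvNorm inner.keys) tu := by
      rw [pvItemA, insert_pvMapV]
      rw [show pvNorm ((tu.getD c PySem.Dict.empty).insert item
            (((tu.getD c PySem.Dict.empty).getD item PySem.Set.empty).add file)).keys
          = pvNorm (tu.getD c PySem.Dict.empty).keys from by rw [hkeys']]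
      apply insert_get?_self
      · rw [keys_pvMapV]; exact hnd
      · rw [get?_pvMapV, hget]; rfl
    have h2 : pvMapV PySem.Dict.keys (pvItemA file c tu item) = pvMapV PySem.Dict.keys tu := by
      rw [pvItemA, insert_pvMapV]
      rw [show PySem.Dict.keys ((tu.getD c PySem.Dict.empty).insert item
            (((tu.getD c PySem.Dict.empty).getD item PySem.Set.empty).add file))
          = (tu.getD c PySem.Dict.empty).keys from hkeys']
      apply insert_get?_self
      · rw [keys_pvMapV]; exact hnd
      · rw [get?_pvMapV, hget]; rfl
    show pvItemB c (pvF tu) item = (pvMapV (fun inner => pvNorm inner.keys) (pvItemA file c tu item), pvMapV PySem.Dict.keys (pvItemA file c tu item))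
    rw [h1, h2]
    simp only [pvItemB, hs, hkc, if_pos]
    rfl
  · -- a new exact term: both sides append it to the category's variant group for its base form
    have hci' : (tu.getD c PySem.Dict.empty).contains item = false := by
      simpa using hci
    have hkc : PySem.Set.contains ((tu.getD c PySem.Dict.empty).keys) item = false := by
      simp only [PySem.Set.contains]
      rw [Bool.eq_false_iff]
      intro hmem
      exact hci ((PySem.Dict.contains_iff_mem_keys _ item).mpr (List.contains_iff_mem.mp hmem))
    have hkeys' :
        ((tu.getD c PySem.Dict.empty).insert item
          (((tu.getD c PySem.Dict.empty).getD item PySem.Set.empty).add file)).keys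
        = (tu.getD c PySem.Dict.empty).keys ++ [item] :=
      PySem.Dict.keys_insert_of_not_contains _ _ hci'
    have hadd : PySem.Set.add ((tu.getD c PySem.Dict.empty).keys) item
        = (tu.getD c PySem.Dict.empty).keys ++ [item] := by
      simp only [PySem.Set.add, hkc]
      simp
    show pvItemB c (pvF tu) item
        = (pvMapV (fun inner => pvNorm inner.keys) (pvItemA file c tu item),
           pvMapV PySem.Dict.keys (pvItemA file c tu item))
    rw [show pvMapV (fun inner => pvNorm inner.keys) (pvItemA file c tu item)
        = (pvMapV (fun inner => pvNorm inner.keys) tu).insert c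
            (pvNorm ((tu.getD c PySem.Dict.empty).keys ++ [item])) from by
      rw [pvItemA, insert_pvMapV, hkeys']]
    rw [show pvMapV PySem.Dict.keys (pvItemA file c tu item)
        = (pvMapV PySem.Dict.keys tu).insert c ((tu.getD c PySem.Dict.empty).keys ++ [item]) from by
      rw [pvItemA, insert_pvMapV, hkeys']]
    simp only [pvItemB, hs, hkc, if_neg, Bool.false_eq_true, not_false_iff]
    rw [hg, hadd, pvNorm_append]
    rfl

-- A's item step preserves uniqueness of the outer keys
theorem pvItemA_nodup (file c : String) (tu : PySem.Dict String (PySem.Dict String (PySem.Set String)))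
    (item : String) (hnd : tu.keys.Nodup) : (pvItemA file c tu item).keys.Nodup :=
  PySem.Dict.nodup_keys_insert _ _ _ hnd

-- fold a simulation (with an invariant) through a list
theorem pv_foldl_hom {α β γ : Type} (F : α → β) (P : α → Prop) (f : α → γ → α) (g : β → γ → β)
    (hP : ∀ s x, P s → P (f s x)) (hc : ∀ s x, P s → g (F s) x = F (f s x)) :
    ∀ (l : List γ) (s : α), P s → l.foldl g (F s) = F (l.foldl f s) ∧ P (l.foldl f s) := by
  intro l
  induction l with
  | nil => intro s hs; exact ⟨rfl, hs⟩
  | cons x t ih =>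
    intro s hs
    have h1 := hc s x hs
    have h2 := hP s x hs
    simpa [List.foldl_cons, h1] using ih (f s x) h2

theorem cat_commute (file : String) (tu : PySem.Dict String (PySem.Dict String (PySem.Set String)))
    (ci : String × List String) (hnd : tu.keys.Nodup) :
    pvCatB (pvF tu) ci = pvF (pvCatA file tu ci) ∧ (pvCatA file tu ci).keys.Nodup :=
  pv_foldl_hom pvF (fun tu => tu.keys.Nodup) (pvItemA file ci.1) (pvItemB ci.1)
    (fun s x hs => pvItemA_nodup file ci.1 s x hs)
    (fun s x hs => item_commute file ci.1 s x hs) ci.2 tu hnd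

theorem file_commute (tu : PySem.Dict String (PySem.Dict String (PySem.Set String)))
    (fc : String × List (String × List String)) (hnd : tu.keys.Nodup) :
    pvFileB (pvF tu) fc = pvF (pvFileA tu fc) ∧ (pvFileA tu fc).keys.Nodup :=
  pv_foldl_hom pvF (fun tu => tu.keys.Nodup) (pvCatA fc.1) pvCatB
    (fun s x hs => (cat_commute fc.1 s x hs).2)
    (fun s x hs => (cat_commute fc.1 s x hs).1) fc.2 tu hnd

theorem top_commute (lexicon : List (String × List (String × List String))) :
    lexicon.foldl pvFileB (pvF PySem.Dict.empty) = pvF (lexicon.foldl pvFileA PySem.Dict.empty) :=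
  (pv_foldl_hom pvF (fun tu => tu.keys.Nodup) pvFileA pvFileB
    (fun s x hs => (file_commute s x hs).2)
    (fun s x hs => (file_commute s x hs).1) lexicon PySem.Dict.empty List.nodup_nil).1

theorem ports_eq (lexicon : List (String × List (String × List String))) :
    analyze_drift lexicon = analyze_drift_alt lexicon := by
  show ((lexicon.foldl pvFileA PySem.Dict.empty).items.foldl
          (fun ds ct => (pvNorm ct.2.keys).items.foldl pvDStep ds) PySem.Dict.empty).items
      = (((lexicon.foldl pvFileB (pvF PySem.Dict.empty)).1.values).foldl
          (fun ds bases => bases.items.foldl pvDStep ds) PySem.Dict.empty).items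
  rw [top_commute]
  rw [show (pvF (lexicon.foldl pvFileA PySem.Dict.empty)).1
      = pvMapV (fun inner => pvNorm inner.keys) (lexicon.foldl pvFileA PySem.Dict.empty) from rfl]
  rw [values_pvMapV, List.foldl_map]

-- ===== VERDICT (by name: the statement is the Claim_ definition above) =====
theorem analyze_drift_spec : Claim_equal_analyze_drift := by
  intro lexicon _
  exact ports_eq lexicon
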